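-- pv_equiv track=rewrite | github.com/spyder-ide/spyder | spyder/plugins/editor/panels/codefolding.py | __compute_line_offsets
-- ===== SOURCE A (Python) =====
-- def __compute_line_offsets(text, reverse=False):
--     lines = text.splitlines(True)
--     line_start_offset = {}
--     offset = 0
--     for i, line in enumerate(lines):
--         if not reverse:
--             line_start_offset[i + 1] = offset
--         else:
--             line_start_offset[offset] = i + 1
--         offset += len(line)
--     return line_start_offset
-- ===== SOURCE B (Python) =====
-- def __compute_line_offsets(text, reverse=False):
--     # A new line starts at 0 and right after each '\n', '\r' or '\r\n':
--     # scan the text for line-terminator positions directly; no splitlines,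
--     # no per-line lengths, no cumulative sum.
--     n = len(text)
--     starts = []
--     pos = 0
--     while pos < n:
--         starts.append(pos)
--         end = pos
--         while end < n and text[end] != '\n' and text[end] != '\r':
--             end += 1
--         if end < n:
--             if text[end] == '\r' and end + 1 < n and text[end + 1] == '\n':
--                 end += 2
--             else:
--                 end += 1
--         pos = end
--     if reverse:
--         return {off: i for i, off in enumerate(starts, 1)}
--     return {i: off for i, off in enumerate(starts, 1)}
-- ===== Notes on version B (the rewrite author's own statement) =====
-- stated objective: alternative
-- what changed: A splits the text into kept-ends lines and accumulates their lengths into a running offset inside one dict-building loop; B never splits or sums lengths: it scans the raw text for line-terminator positions ('\n', '\r', '\r\n') to collect the line-start positions directly, then builds the dict from that position list in a separate enumerate pass.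
import Mathlib
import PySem

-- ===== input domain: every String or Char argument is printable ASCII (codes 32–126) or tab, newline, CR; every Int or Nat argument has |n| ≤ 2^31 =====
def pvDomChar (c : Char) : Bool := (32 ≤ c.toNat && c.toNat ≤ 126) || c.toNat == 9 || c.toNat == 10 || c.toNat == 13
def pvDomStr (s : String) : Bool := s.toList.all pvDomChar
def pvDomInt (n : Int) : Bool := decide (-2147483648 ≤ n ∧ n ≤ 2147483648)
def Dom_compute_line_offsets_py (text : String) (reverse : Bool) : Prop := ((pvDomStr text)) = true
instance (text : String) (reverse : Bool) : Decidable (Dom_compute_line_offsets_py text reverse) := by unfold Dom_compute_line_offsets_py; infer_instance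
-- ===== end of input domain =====

-- B replaces A's splitlines+length-accumulating dict loop by a direct scan of the text for
-- line-terminator positions, collecting line-start positions and assembling the dict separately
-- (alternative algorithm, same cost).


-- ===== PORT A =====
-- text.splitlines(True) (keepends); exact on Dom, where the only line-break characters are \n, \r, \r\n
def splitlinesKeep : List Char → List (List Char)
  | [] => []
  | '\r' :: '\n' :: rest => ['\r', '\n'] :: splitlinesKeep rest
  | '\n' :: rest => ['\n'] :: splitlinesKeep rest
  | '\r' :: rest => ['\r'] :: splitlinesKeep rest
  | c :: rest =>
    match splitlinesKeep rest with
    | [] => [[c]]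
    | l :: ls => (c :: l) :: ls

def compute_line_offsets_py (text : String) (reverse : Bool) : List (Int × Int) :=
  let lines := splitlinesKeep text.toList
  let res := (PySem.List.enumerate lines 0).foldl
    (fun (st : PySem.Dict Int Int × Int) p =>
      ((if !reverse then st.1.insert (p.1 + 1) st.2 else st.1.insert st.2 (p.1 + 1)),
       st.2 + (p.2.length : Int)))
    (PySem.Dict.empty, 0)
  res.1.items

-- ===== PORT B =====
-- B's inner while loop + terminator branch: consume one line (incl. its terminator) from the
-- remaining characters, returning the rest and the updated position
def skipLine : List Char → Int → (List Char × Int)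
  | [], pos => ([], pos)
  | c :: rest, pos =>
    if c = '\n' then (rest, pos + 1)
    else if c = '\r' then
      match rest with
      | d :: rest2 => if d = '\n' then (rest2, pos + 2) else (rest, pos + 1)
      | [] => (rest, pos + 1)
    else skipLine rest (pos + 1)

-- termination of B's outer while loop: each line consumes at least one character
lemma skipLine_length_lt : ∀ (cs : List Char) (pos : Int), cs ≠ [] → (skipLine cs pos).1.length < cs.length := by
  intro cs
  induction cs with
  | nil => intro pos h; exact absurd rfl h
  | cons c rest ih =>
    intro pos _
    simp only [skipLine]
    split_ifs with h1 h2
    · simp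
    · cases rest with
      | nil => simp
      | cons d r2 => by_cases hd : d = '\n' <;> simp [hd]
    · cases rest with
      | nil => simp [skipLine]
      | cons d r2 =>
        have h := ih (pos + 1) (by simp)
        simp only [List.length_cons] at h ⊢
        omega

-- B's outer while loop: the list of line-start positions
def lineStarts (cs : List Char) (pos : Int) : List Int :=
  if h : cs = [] then []
  else
    let p := skipLine cs pos
    pos :: lineStarts p.1 p.2
termination_by cs.length
decreasing_by exact skipLine_length_lt cs pos h

def compute_line_offsets_py_alt (text : String) (reverse : Bool) : List (Int × Int) :=
  let starts := lineStarts text.toList 0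
  if reverse then
    ((PySem.List.enumerate starts 1).foldl
      (fun (d : PySem.Dict Int Int) p => d.insert p.2 p.1) PySem.Dict.empty).items
  else
    ((PySem.List.enumerate starts 1).foldl
      (fun (d : PySem.Dict Int Int) p => d.insert p.1 p.2) PySem.Dict.empty).items

-- ===== PRECONDITION & SPEC =====
def Spec_compute_line_offsets_py (text : String) (reverse : Bool) (out : List (Int × Int)) : Prop := out = compute_line_offsets_py_alt text reverse
instance (text : String) (reverse : Bool) (out : List (Int × Int)) : Decidable (Spec_compute_line_offsets_py text reverse out) := by unfold Spec_compute_line_offsets_py; infer_instance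

-- ===== CLAIM (what is proved, stated in full; the proofs are below) =====
def Claim_equal_compute_line_offsets_py : Prop := ∀ (text : String) (reverse : Bool), Dom_compute_line_offsets_py text reverse → Spec_compute_line_offsets_py text reverse (compute_line_offsets_py text reverse)

-- ===== LEMMAS AND PROOFS =====

-- the common middleman: the list of pairs both programs produce
def pvPairs (rev : Bool) : List (List Char) → Int → Int → List (Int × Int)
  | [], _, _ => []
  | l :: ls, i, off =>
    (if rev then (off, i + 1) else (i + 1, off)) :: pvPairs rev ls (i + 1) (off + (l.length : Int))

-- the prefix-offset table of a list of lines
def pvOffs : List (List Char) → Int → List Int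
  | [], _ => []
  | l :: ls, t => t :: pvOffs ls (t + (l.length : Int))

lemma splitlinesKeep_ne_nil (cs : List Char) : ∀ l ∈ splitlinesKeep cs, l ≠ [] := by
  fun_induction splitlinesKeep cs with
  | case1 => simp
  | case2 rest ih =>
      intro l hl
      rcases List.mem_cons.mp hl with h | h
      · subst h; simp
      · exact ih l h
  | case3 rest ih =>
      intro l hl
      rcases List.mem_cons.mp hl with h | h
      · subst h; simp
      · exact ih l h
  | case4 rest _ ih =>
      intro l hl
      rcases List.mem_cons.mp hl with h | h
      · subst h; simp
      · exact ih l h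
  | case5 c rest _ _ _ heq ih =>
      intro l hl
      rcases List.mem_cons.mp hl with h | h
      · subst h; simp
      · simp at h
  | case6 c rest _ _ _ l0 ls heq ih =>
      intro l hl
      rcases List.mem_cons.mp hl with h | h
      · subst h; simp
      · exact ih l (by rw [heq]; exact List.mem_cons_of_mem _ h)

lemma splitlinesKeep_nil_iff (cs : List Char) : splitlinesKeep cs = [] ↔ cs = [] := by
  fun_induction splitlinesKeep cs <;> simp_all

-- skipLine consumes exactly the first splitlines(True) line
lemma skipLine_spec (cs : List Char) : ∀ (pos : Int) (l : List Char) (ls : List (List Char)),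
    splitlinesKeep cs = l :: ls →
    splitlinesKeep (skipLine cs pos).1 = ls ∧ (skipLine cs pos).2 = pos + (l.length : Int) := by
  fun_induction splitlinesKeep cs with
  | case1 => intro pos l ls h; simp at h
  | case2 rest ih =>
      intro pos l ls h
      obtain ⟨hl, hls⟩ := List.cons.inj h
      subst hl; subst hls
      refine ⟨by simp [skipLine], by simp [skipLine]⟩
  | case3 rest ih =>
      intro pos l ls h
      obtain ⟨hl, hls⟩ := List.cons.inj h
      subst hl; subst hls
      exact ⟨by simp [skipLine], by simp [skipLine]⟩
  | case4 rest hne ih =>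
      intro pos l ls h
      obtain ⟨hl, hls⟩ := List.cons.inj h
      subst hl; subst hls
      have hm : skipLine ('\r' :: rest) pos = (rest, pos + 1) := by
        cases rest with
        | nil => simp [skipLine]
        | cons d r2 =>
          have hd : d ≠ '\n' := fun hd => hne r2 (by rw [hd])
          simp [skipLine, hd]
      rw [hm]
      exact ⟨rfl, by simp⟩
  | case5 c rest h1 h2 h3 heq ih =>
      intro pos l ls h
      obtain ⟨hl, hls⟩ := List.cons.inj h
      have hrest : rest = [] := (splitlinesKeep_nil_iff rest).mp heq
      subst hrest; subst hl; subst hls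
      simp [skipLine, splitlinesKeep]
  | case6 c rest h1 h2 h3 l0 ls0 heq ih =>
      intro pos l ls h
      obtain ⟨hl, hls⟩ := List.cons.inj h
      obtain ⟨ha, hb⟩ := ih (pos + 1) l0 ls0 heq
      subst hl; subst hls
      constructor
      · simpa [skipLine, if_neg h2, if_neg h3] using ha
      · simp only [skipLine, if_neg h2, if_neg h3]
        rw [hb]
        simp; ring

-- B's position list equals the prefix-offset table of A's lines
lemma lineStarts_eq_pvOffs : ∀ (n : Nat) (cs : List Char), cs.length ≤ n →
    ∀ (pos : Int), lineStarts cs pos = pvOffs (splitlinesKeep cs) pos := by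
  intro n
  induction n with
  | zero =>
    intro cs h pos
    have : cs = [] := List.eq_nil_of_length_eq_zero (Nat.le_zero.mp h)
    subst this
    rw [lineStarts]
    simp [pvOffs, splitlinesKeep]
  | succ n ih =>
    intro cs h pos
    cases hcs : cs with
    | nil => rw [lineStarts]; simp [pvOffs, splitlinesKeep]
    | cons c rest =>
      subst hcs
      obtain ⟨l, ls, hsl⟩ : ∃ l ls, splitlinesKeep (c :: rest) = l :: ls := by
        cases hq : splitlinesKeep (c :: rest) with
        | nil => exact absurd ((splitlinesKeep_nil_iff _).mp hq) (by simp)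
        | cons a b => exact ⟨a, b, rfl⟩
      obtain ⟨h1, h2⟩ := skipLine_spec (c :: rest) pos l ls hsl
      rw [lineStarts]
      simp only [dif_neg (by simp : ¬ (c :: rest : List Char) = [])]
      rw [hsl]
      simp only [pvOffs]
      congr 1
      have hlt := skipLine_length_lt (c :: rest) pos (by simp)
      rw [ih _ (by simp only [List.length_cons] at h hlt; omega) _, h1, h2]

lemma A_fold_false (lines : List (List Char)) :
    ∀ (d : PySem.Dict Int Int) (i off : Int), d.keys.Nodup → (∀ k ∈ d.keys, k < i + 1) →
    (((PySem.List.enumerate lines i).foldl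
      (fun (st : PySem.Dict Int Int × Int) p => (st.1.insert (p.1 + 1) st.2, st.2 + (p.2.length : Int)))
      (d, off)).1).items = d.items ++ pvPairs false lines i off := by
  induction lines with
  | nil => intro d i off _ _; simp [PySem.List.enumerate_nil, pvPairs]
  | cons l ls ih =>
    intro d i off hnd hkeys
    rw [PySem.List.enumerate_cons]
    simp only [List.foldl_cons]
    have hfresh : d.contains (i + 1) = false := by
      rw [Bool.eq_false_iff]
      intro hc
      have := hkeys _ ((PySem.Dict.contains_iff_mem_keys d (i+1)).mp hc)
      omega
    rw [ih (d.insert (i + 1) off) (i + 1) (off + (l.length : Int))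
        (PySem.Dict.nodup_keys_insert _ _ _ hnd)
        (by intro k hk
            rcases (PySem.Dict.mem_keys_insert _ _ _ _).mp hk with h | h
            · omega
            · have := hkeys k h; omega)]
    rw [PySem.Dict.items_insert_of_not_contains _ _ hfresh]
    simp [pvPairs]

lemma A_fold_true (lines : List (List Char)) :
    ∀ (d : PySem.Dict Int Int) (i off : Int), d.keys.Nodup → (∀ k ∈ d.keys, k < off) →
    (∀ l ∈ lines, l ≠ []) →
    (((PySem.List.enumerate lines i).foldl
      (fun (st : PySem.Dict Int Int × Int) p => (st.1.insert st.2 (p.1 + 1), st.2 + (p.2.length : Int)))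
      (d, off)).1).items = d.items ++ pvPairs true lines i off := by
  induction lines with
  | nil => intro d i off _ _ _; simp [PySem.List.enumerate_nil, pvPairs]
  | cons l ls ih =>
    intro d i off hnd hkeys hne
    rw [PySem.List.enumerate_cons]
    simp only [List.foldl_cons]
    have hlen : 1 ≤ (l.length : Int) := by
      have : l ≠ [] := hne l (List.mem_cons_self ..)
      have : 0 < l.length := List.length_pos_iff.mpr this
      omega
    have hfresh : d.contains off = false := by
      rw [Bool.eq_false_iff]
      intro hc
      have := hkeys _ ((PySem.Dict.contains_iff_mem_keys d off).mp hc)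
      omega
    rw [ih (d.insert off (i + 1)) (i + 1) (off + (l.length : Int))
        (PySem.Dict.nodup_keys_insert _ _ _ hnd)
        (by intro k hk
            rcases (PySem.Dict.mem_keys_insert _ _ _ _).mp hk with h | h
            · omega
            · have := hkeys k h; omega)
        (by intro l' hl'; exact hne l' (List.mem_cons_of_mem _ hl'))]
    rw [PySem.Dict.items_insert_of_not_contains _ _ hfresh]
    simp [pvPairs]

lemma enum_offs_false (lines : List (List Char)) :
    ∀ (i off : Int), PySem.List.enumerate (pvOffs lines off) (i + 1) = pvPairs false lines i off := by
  induction lines with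
  | nil => intro i off; simp [pvOffs, pvPairs, PySem.List.enumerate_nil]
  | cons l ls ih =>
    intro i off
    simp only [pvOffs, pvPairs, PySem.List.enumerate_cons, Bool.false_eq_true, if_false]
    exact congrArg _ (ih (i + 1) (off + (l.length : Int)))

lemma enum_offs_true (lines : List (List Char)) :
    ∀ (i off : Int), (PySem.List.enumerate (pvOffs lines off) (i + 1)).map (fun p => (p.2, p.1))
      = pvPairs true lines i off := by
  induction lines with
  | nil => intro i off; simp [pvOffs, pvPairs, PySem.List.enumerate_nil]
  | cons l ls ih =>
    intro i off
    simp only [pvOffs, pvPairs, PySem.List.enumerate_cons, List.map_cons, if_true]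
    exact congrArg _ (ih (i + 1) (off + (l.length : Int)))

lemma pvOffs_lb (lines : List (List Char)) :
    ∀ (t : Int), ∀ x ∈ pvOffs lines t, t ≤ x := by
  induction lines with
  | nil => intro t x hx; simp [pvOffs] at hx
  | cons l ls ih =>
    intro t x hx
    simp only [pvOffs, List.mem_cons] at hx
    rcases hx with h | h
    · omega
    · have := ih (t + (l.length : Int)) x h
      have : (0 : Int) ≤ (l.length : Int) := by positivity
      omega

lemma pvOffs_pairwise (lines : List (List Char)) (hne : ∀ l ∈ lines, l ≠ []) :
    ∀ (t : Int), (pvOffs lines t).Pairwise (· < ·) := by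
  induction lines with
  | nil => intro t; simp [pvOffs]
  | cons l ls ih =>
    intro t
    have hlen : 1 ≤ (l.length : Int) := by
      have : l ≠ [] := hne l (List.mem_cons_self ..)
      have : 0 < l.length := List.length_pos_iff.mpr this
      omega
    simp only [pvOffs]
    refine List.Pairwise.cons ?_ (ih (fun l' hl' => hne l' (List.mem_cons_of_mem _ hl')) _)
    intro x hx
    have := pvOffs_lb ls (t + (l.length : Int)) x hx
    omega

-- ===== VERDICT (by name: the statement is the Claim_ definition above) =====
theorem compute_line_offsets_py_spec : Claim_equal_compute_line_offsets_py := by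
  intro text reverse _
  have hne := splitlinesKeep_ne_nil text.toList
  simp only [Spec_compute_line_offsets_py, compute_line_offsets_py, compute_line_offsets_py_alt]
  set lines := splitlinesKeep text.toList with hl
  rw [lineStarts_eq_pvOffs text.toList.length text.toList le_rfl 0, ← hl]
  cases reverse with
  | false =>
    simp only [Bool.not_false, if_true]
    rw [A_fold_false lines PySem.Dict.empty 0 0 (PySem.Dict.nodup_keys_empty) (by simp [PySem.Dict.keys_empty])]
    simp only [Bool.false_eq_true, if_false]
    have hB := PySem.Dict.items_foldl_insert_fresh (PySem.List.enumerate (pvOffs lines 0) 1)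
        (fun p : Int × Int => p.1) (fun p : Int × Int => p.2) PySem.Dict.empty
        (by intro a _; exact PySem.Dict.contains_empty _)
        (by
          have hp := PySem.List.pairwise_lt_enumerate (pvOffs lines 0) 1
          have hnd : (((PySem.List.enumerate (pvOffs lines 0) 1)).map (fun p : Int × Int => p.1)).Pairwise (· ≠ ·) := by
            rw [List.pairwise_map]
            exact hp.imp (fun h => ne_of_lt h)
          exact hnd)
    rw [hB]
    rw [show (1 : Int) = 0 + 1 by ring, enum_offs_false lines 0 0]
    simp
  | true =>
    simp only [Bool.not_true, Bool.false_eq_true, if_false, if_true]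
    rw [A_fold_true lines PySem.Dict.empty 0 0 (PySem.Dict.nodup_keys_empty) (by simp [PySem.Dict.keys_empty]) hne]
    have hB := PySem.Dict.items_foldl_insert_fresh (PySem.List.enumerate (pvOffs lines 0) 1)
        (fun p : Int × Int => p.2) (fun p : Int × Int => p.1) PySem.Dict.empty
        (by intro a _; exact PySem.Dict.contains_empty _)
        (by
          have hp := pvOffs_pairwise lines hne 0
          have hsnd : ((PySem.List.enumerate (pvOffs lines 0) 1).map (fun p : Int × Int => p.2)) = pvOffs lines 0 :=
            PySem.List.map_snd_enumerate _ _
          rw [hsnd]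
          exact hp.imp (fun h => ne_of_lt h))
    rw [hB]
    rw [show (1 : Int) = 0 + 1 by ring, enum_offs_true lines 0 0]
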